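-- pv_equiv track=rewrite | github.com/Pywwo/gomoku | score.py | calc_score_line
-- ===== SOURCE A (Python) =====
-- SCORE_4_ROW = [0, 2000000, 5000000] #score as 4 in a row, 0 if no open ends, 100000 if 1 and 2000000 if two
--
-- SCORE_3_ROW = [0, 30000, 800000] # score 3 in a row
--
-- SCORE_2_ROW = [0, 1000, 9000] # score 2 in a row
--
-- def four_in_a_row_line(board, i, j, checking):
--     if j + 4 > len(board):
--         return [False]
--     if board[i][j + 1] == checking and board[i][j + 2] == checking and board[i][j + 3] == checking:
--         #open ends
--         open_ends = 0
--         if j + 4 < len(board) and board[i][j + 4] == 0: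
--             open_ends += 1
--         if j - 1 >= 0 and board[i][j - 1] == 0:
--             open_ends += 1
--         return [True, SCORE_4_ROW[open_ends]]
--     return [False]
--
-- def three_in_a_row_line(board, i, j, checking):
--     if j + 3 > len(board):
--         return [False]
--     if board[i][j + 1] == checking and board[i][j + 2] == checking:
--         #open ends
--         open_ends = 0
--         check_left = j
--         while check_left - 1 >= 0:
--             if board[i][check_left - 1] != 0 and board[i][check_left - 1] != checking:
--                 break
--             check_left -= 1
--         check_right = j + 2
--         while check_right + 1 < len(board):
--             if board[i][check_right + 1] != 0 and board[i][check_right + 1] != checking: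
--                 break
--             check_right += 1
--         if check_right - check_left < 4:
--             return [True, 0]
--         if j - 1 >= 0 and board[i][j - 1] == 0:
--             open_ends += 1
--         if j + 3 < len(board) and board[i][j + 3] == 0:
--             open_ends += 1
--         return [True, SCORE_3_ROW[open_ends]]
--     return [False]
--
-- def two_in_a_row_line(board, i, j, checking):
--     if j + 2 > len(board):
--         return [False]
--     if board[i][j + 1] == checking:
--         #open ends
--         open_ends = 0
--         check_left = j
--         while check_left - 1 >= 0:
--             if board[i][check_left - 1] != 0 and board[i][check_left - 1] != checking:
--                 break
--             check_left -= 1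
--         check_right = j + 1
--         while check_right + 1 < len(board):
--             if board[i][check_right + 1] != 0 and board[i][check_right + 1] != checking:
--                 break
--             check_right += 1
--         if check_right - check_left < 4:
--             return [True, 0]
--         if j - 1 >= 0 and board[i][j - 1] == 0:
--             open_ends += 1
--         if j + 2 < len(board) and board[i][j + 2] == 0:
--             open_ends += 1
--         return [True, SCORE_2_ROW[open_ends]]
--     return [False]
--
-- def calc_score_line(board, checking):
--     score = 0
--     j = 0
--     for i in range(len(board)):
--         while j < len(board):
--             if board[i][j] != checking:
--                 j += 1
--                 continue
--             #calc pawns on board to opti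
--             #check win
--             arr = four_in_a_row_line(board, i, j, checking)
--             if arr[0] == True:
--                 score += arr[1]
--                 j += 4
--                 continue
--             arr = three_in_a_row_line(board, i, j, checking)
--             if arr[0] == True:
--                 score += arr[1]
--                 j += 3
--                 continue
--             if score < 10000:
--                 arr = two_in_a_row_line(board, i, j, checking)
--                 if arr[0] == True:
--                     score += arr[1]
--                     j += 2
--                     continue
--             j += 1
--         j = 0
--     return score
-- ===== SOURCE B (Python) =====
-- SCORE_4_ROW = [0, 2000000, 5000000]
-- SCORE_3_ROW = [0, 30000, 800000]
-- SCORE_2_ROW = [0, 1000, 9000]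
--
-- def calc_score_line(board, checking):
--     n = len(board)
--     total = 0
--     for row in board:
--         # precompute, in one pass each way, the boundaries of the maximal
--         # blocker-free segment (cells == 0 or == checking) around each column
--         L = [0] * n
--         for j in range(n):
--             L[j] = j if j == 0 or (row[j - 1] != 0 and row[j - 1] != checking) else L[j - 1]
--         R = [0] * n
--         for j in range(n - 1, -1, -1):
--             R[j] = j if j == n - 1 or (row[j + 1] != 0 and row[j + 1] != checking) else R[j + 1]
--         j = 0
--         while j < n:
--             if row[j] != checking:
--                 j += 1
--             elif j + 4 <= n and row[j + 1] == checking and row[j + 2] == checking and row[j + 3] == checking: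
--                 oe = (j + 4 < n and row[j + 4] == 0) + (j >= 1 and row[j - 1] == 0)
--                 total += SCORE_4_ROW[oe]
--                 j += 4
--             elif j + 3 <= n and row[j + 1] == checking and row[j + 2] == checking:
--                 if R[j + 2] - L[j] >= 4:
--                     oe = (j >= 1 and row[j - 1] == 0) + (j + 3 < n and row[j + 3] == 0)
--                     total += SCORE_3_ROW[oe]
--                 j += 3
--             elif total < 10000 and j + 2 <= n and row[j + 1] == checking:
--                 if R[j + 1] - L[j] >= 4:
--                     oe = (j >= 1 and row[j - 1] == 0) + (j + 2 < n and row[j + 2] == 0)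
--                     total += SCORE_2_ROW[oe]
--                 j += 2
--             else:
--                 j += 1
--     return total
-- ===== Notes on version B (the rewrite author's own statement) =====
-- stated objective: alternative
-- what changed: B precomputes, per row in one left and one right pass, boundary tables L/R of the maximal blocker-free segment around every column, so the left/right while-scans inside the three/two-in-a-row room checks become table lookups; the pattern tests are inlined into one elif chain instead of helper functions returning [flag, score].
import Mathlib
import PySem

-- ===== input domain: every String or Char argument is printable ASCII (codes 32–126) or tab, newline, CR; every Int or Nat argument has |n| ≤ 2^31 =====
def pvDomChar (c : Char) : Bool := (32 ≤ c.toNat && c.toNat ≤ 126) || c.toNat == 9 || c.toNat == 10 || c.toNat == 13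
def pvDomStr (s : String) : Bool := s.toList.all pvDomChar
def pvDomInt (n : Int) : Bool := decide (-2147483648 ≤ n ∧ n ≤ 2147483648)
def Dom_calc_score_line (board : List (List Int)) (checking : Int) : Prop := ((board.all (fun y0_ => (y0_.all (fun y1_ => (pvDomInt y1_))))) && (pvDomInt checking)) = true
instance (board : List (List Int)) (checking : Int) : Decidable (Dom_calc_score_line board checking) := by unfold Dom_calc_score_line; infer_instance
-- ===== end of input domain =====

-- B replaces the per-hit left/right while-scans of A's room check by per-row
-- precomputed segment-boundary tables (one left pass, one right pass).

-- ===== PORT A =====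

-- A's left while-scan: check_left starts at j, moves left over non-blocker cells
def pvScanL (row : List Int) (checking : Int) : Nat → Nat
  | 0 => 0
  | j+1 => if row.getD j 0 ≠ 0 ∧ row.getD j 0 ≠ checking then j+1 else pvScanL row checking j

-- A's right while-scan: check_right starts at r, moves right while r+1 < n and non-blocker
def pvScanR (row : List Int) (checking : Int) (n r : Nat) : Nat :=
  if _h : r + 1 < n then
    if row.getD (r+1) 0 ≠ 0 ∧ row.getD (r+1) 0 ≠ checking then r
    else pvScanR row checking n (r+1)
  else r
termination_by n - r

def pvFour (row : List Int) (n : Nat) (checking : Int) (j : Nat) : Option Int :=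
  if j + 4 > n then none
  else if row.getD (j+1) 0 = checking ∧ row.getD (j+2) 0 = checking ∧ row.getD (j+3) 0 = checking then
    some ([0, 2000000, 5000000].getD
      ((if j+4 < n ∧ row.getD (j+4) 0 = 0 then 1 else 0) +
       (if 1 ≤ j ∧ row.getD (j-1) 0 = 0 then 1 else 0)) 0)
  else none

def pvThree (row : List Int) (n : Nat) (checking : Int) (j : Nat) : Option Int :=
  if j + 3 > n then none
  else if row.getD (j+1) 0 = checking ∧ row.getD (j+2) 0 = checking then
    some (if pvScanR row checking n (j+2) - pvScanL row checking j < 4 then 0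
      else [0, 30000, 800000].getD
        ((if 1 ≤ j ∧ row.getD (j-1) 0 = 0 then 1 else 0) +
         (if j+3 < n ∧ row.getD (j+3) 0 = 0 then 1 else 0)) 0)
  else none

def pvTwo (row : List Int) (n : Nat) (checking : Int) (j : Nat) : Option Int :=
  if j + 2 > n then none
  else if row.getD (j+1) 0 = checking then
    some (if pvScanR row checking n (j+1) - pvScanL row checking j < 4 then 0
      else [0, 1000, 9000].getD
        ((if 1 ≤ j ∧ row.getD (j-1) 0 = 0 then 1 else 0) +
         (if j+2 < n ∧ row.getD (j+2) 0 = 0 then 1 else 0)) 0)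
  else none

def pvLoopA (row : List Int) (n : Nat) (checking : Int) (j : Nat) (score : Int) : Int :=
  if _h : j < n then
    if row.getD j 0 ≠ checking then pvLoopA row n checking (j+1) score
    else match pvFour row n checking j with
      | some s => pvLoopA row n checking (j+4) (score + s)
      | none => match pvThree row n checking j with
        | some s => pvLoopA row n checking (j+3) (score + s)
        | none =>
          if score < 10000 then
            match pvTwo row n checking j with
            | some s => pvLoopA row n checking (j+2) (score + s)
            | none => pvLoopA row n checking (j+1) score
          else pvLoopA row n checking (j+1) score
  else score
termination_by n - j

def calc_score_line (board : List (List Int)) (checking : Int) : Int :=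
  board.foldl (fun score row => pvLoopA row board.length checking 0 score) 0

-- ===== PORT B =====

-- left-boundary table: L[j] = j if j==0 or row[j-1] is a blocker else L[j-1]
def pvBuildL (row : List Int) (checking : Int) : Nat → List Nat
  | 0 => []
  | m+1 =>
    let prev := pvBuildL row checking m
    prev ++ [if m = 0 then 0
      else if row.getD (m-1) 0 ≠ 0 ∧ row.getD (m-1) 0 ≠ checking then m
      else prev.getD (m-1) 0]

-- right-boundary table, filled from the right: step k+1 prepends R[n-(k+1)]
def pvBuildR (row : List Int) (checking : Int) (n : Nat) : Nat → List Nat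
  | 0 => []
  | k+1 =>
    let rest := pvBuildR row checking n k
    (if n - (k+1) = n - 1 then n - (k+1)
     else if row.getD (n - (k+1) + 1) 0 ≠ 0 ∧ row.getD (n - (k+1) + 1) 0 ≠ checking then n - (k+1)
     else rest.getD 0 0) :: rest

def pvLoopB (row : List Int) (L R : List Nat) (n : Nat) (checking : Int) (j : Nat) (total : Int) : Int :=
  if _h : j < n then
    if row.getD j 0 ≠ checking then pvLoopB row L R n checking (j+1) total
    else if j+4 ≤ n ∧ row.getD (j+1) 0 = checking ∧ row.getD (j+2) 0 = checking ∧ row.getD (j+3) 0 = checking then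
      pvLoopB row L R n checking (j+4) (total + [0, 2000000, 5000000].getD
        ((if j+4 < n ∧ row.getD (j+4) 0 = 0 then 1 else 0) +
         (if 1 ≤ j ∧ row.getD (j-1) 0 = 0 then 1 else 0)) 0)
    else if j+3 ≤ n ∧ row.getD (j+1) 0 = checking ∧ row.getD (j+2) 0 = checking then
      pvLoopB row L R n checking (j+3)
        (if 4 ≤ R.getD (j+2) 0 - L.getD j 0 then
          total + [0, 30000, 800000].getD
            ((if 1 ≤ j ∧ row.getD (j-1) 0 = 0 then 1 else 0) +
             (if j+3 < n ∧ row.getD (j+3) 0 = 0 then 1 else 0)) 0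
         else total)
    else if total < 10000 ∧ j+2 ≤ n ∧ row.getD (j+1) 0 = checking then
      pvLoopB row L R n checking (j+2)
        (if 4 ≤ R.getD (j+1) 0 - L.getD j 0 then
          total + [0, 1000, 9000].getD
            ((if 1 ≤ j ∧ row.getD (j-1) 0 = 0 then 1 else 0) +
             (if j+2 < n ∧ row.getD (j+2) 0 = 0 then 1 else 0)) 0
         else total)
    else pvLoopB row L R n checking (j+1) total
  else total
termination_by n - j

def calc_score_line_alt (board : List (List Int)) (checking : Int) : Int :=
  board.foldl (fun total row =>
    pvLoopB row (pvBuildL row checking board.length)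
      (pvBuildR row checking board.length board.length) board.length checking 0 total) 0

-- ===== PRECONDITION & SPEC =====
-- A (and B) index every row at columns up to len(board)-1: a row shorter than the
-- board raises IndexError in Python, so exactly those inputs are excluded.
def Pre_calc_score_line (board : List (List Int)) (checking : Int) : Prop :=
  ∀ r ∈ board, board.length ≤ r.length
instance (board : List (List Int)) (checking : Int) : Decidable (Pre_calc_score_line board checking) := by
  unfold Pre_calc_score_line; infer_instance

def pvWitness_calc_score_line : List (List Int) × Int := ([[1, 1], [0, 1]], 1)

def Spec_calc_score_line (board : List (List Int)) (checking : Int) (out : Int) : Prop := out = calc_score_line_alt board checking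
instance (board : List (List Int)) (checking : Int) (out : Int) : Decidable (Spec_calc_score_line board checking out) := by unfold Spec_calc_score_line; infer_instance

-- ===== CLAIM (what is proved, stated in full; the proofs are below) =====
def Claim_equal_calc_score_line : Prop := ∀ (board : List (List Int)) (checking : Int), Dom_calc_score_line board checking → Pre_calc_score_line board checking → Spec_calc_score_line board checking (calc_score_line board checking)

-- ===== LEMMAS AND PROOFS =====

theorem pvBuildL_length (row : List Int) (c : Int) (m : Nat) :
    (pvBuildL row c m).length = m := by
  induction m with
  | zero => rfl
  | succ m ih => simp [pvBuildL, ih]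

theorem pvBuildL_getD (row : List Int) (c : Int) :
    ∀ m j, j < m → (pvBuildL row c m).getD j 0 = pvScanL row c j := by
  intro m
  induction m with
  | zero => intro j hj; omega
  | succ m ih =>
    intro j hj
    rw [pvBuildL]
    rcases Nat.lt_or_ge j m with h | h
    · rw [List.getD_append _ _ _ _ (by simpa [pvBuildL_length] using h)]
      exact ih j h
    · have hjm : j = m := by omega
      subst hjm
      rw [List.getD_eq_getElem?_getD, List.getElem?_append_right (by simp [pvBuildL_length])]
      simp only [pvBuildL_length, Nat.sub_self, List.getElem?_cons_zero, Option.getD_some]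
      cases j with
      | zero => simp [pvScanL]
      | succ k =>
        rw [if_neg (by omega)]
        simp only [Nat.add_sub_cancel]
        rw [pvScanL]
        by_cases hb : row.getD k 0 ≠ 0 ∧ row.getD k 0 ≠ c
        · rw [if_pos hb, if_pos hb]
        · rw [if_neg hb, if_neg hb]
          exact ih k (by omega)

theorem pvBuildR_getD (row : List Int) (c : Int) (n : Nat) :
    ∀ k, k ≤ n → ∀ t, t < k →
      (pvBuildR row c n k).getD t 0 = pvScanR row c n (n - k + t) := by
  intro k
  induction k with
  | zero => intro _ t ht; omega
  | succ k ih =>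
    intro hk t ht
    rw [pvBuildR]
    cases t with
    | succ t =>
      simp only [List.getD_cons_succ]
      rw [ih (by omega) t (by omega)]
      congr 1
      omega
    | zero =>
      simp only [List.getD_cons_zero, Nat.add_zero]
      rw [pvScanR]
      cases k with
      | zero => rw [if_pos (by omega), dif_neg (by omega)]
      | succ k2 =>
        rw [if_neg (by omega), dif_pos (by omega)]
        by_cases hb : row.getD (n - (k2+1+1) + 1) 0 ≠ 0 ∧ row.getD (n - (k2+1+1) + 1) 0 ≠ c
        · rw [if_pos hb, if_pos hb]
        · rw [if_neg hb, if_neg hb]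
          rw [ih (by omega) 0 (by omega)]
          simp only [Nat.add_zero]
          congr 1
          omega

theorem pvLoop_eq (row : List Int) (n : Nat) (c : Int) (f : Nat) :
    ∀ j s, n - j ≤ f →
      pvLoopA row n c j s =
        pvLoopB row (pvBuildL row c n) (pvBuildR row c n n) n c j s := by
  induction f with
  | zero =>
    intro j s hf
    rw [pvLoopA, pvLoopB, dif_neg (by omega), dif_neg (by omega)]
  | succ f ih =>
    intro j s hf
    by_cases hj : j < n
    case neg => rw [pvLoopA, pvLoopB, dif_neg hj, dif_neg hj]
    case pos =>
    by_cases hc : row.getD j 0 ≠ c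
    · rw [pvLoopA, pvLoopB, dif_pos hj, dif_pos hj, if_pos hc, if_pos hc]
      exact ih _ _ (by omega)
    have hsum : ∀ (X : Nat) (v : Int),
        s + (if X < 4 then 0 else v) = if 4 ≤ X then s + v else s := by
      intro X v
      by_cases hx : X < 4
      · rw [if_pos hx, if_neg (by omega), add_zero]
      · rw [if_neg hx, if_pos (by omega)]
    by_cases h4 : j+4 ≤ n ∧ row.getD (j+1) 0 = c ∧ row.getD (j+2) 0 = c ∧ row.getD (j+3) 0 = c
    · rw [pvLoopA, pvLoopB, dif_pos hj, dif_pos hj, if_neg hc, if_neg hc,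
        pvFour, if_neg (by omega), if_pos h4.2, if_pos h4]
      exact ih _ _ (by omega)
    have h4' : pvFour row n c j = none := by
      rw [pvFour]
      by_cases hle : j + 4 ≤ n
      · rw [if_neg (by omega), if_neg (fun h => h4 ⟨hle, h⟩)]
      · rw [if_pos (by omega)]
    by_cases h3 : j+3 ≤ n ∧ row.getD (j+1) 0 = c ∧ row.getD (j+2) 0 = c
    · rw [pvLoopA, pvLoopB, dif_pos hj, dif_pos hj, if_neg hc, if_neg hc, h4', if_neg h4,
        pvThree, if_neg (by omega), if_pos h3.2, if_pos h3,
        pvBuildR_getD row c n n (le_refl n) (j+2) (by omega),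
        pvBuildL_getD row c n j hj]
      simp only [Nat.sub_self, Nat.zero_add]
      simp only [hsum]
      exact ih _ _ (by omega)
    have h3' : pvThree row n c j = none := by
      rw [pvThree]
      by_cases hle : j + 3 ≤ n
      · rw [if_neg (by omega), if_neg (fun h => h3 ⟨hle, h⟩)]
      · rw [if_pos (by omega)]
    by_cases hs : s < 10000
    · by_cases h2 : j+2 ≤ n ∧ row.getD (j+1) 0 = c
      · have hcond : s < 10000 ∧ j+2 ≤ n ∧ row.getD (j+1) 0 = c := ⟨hs, h2.1, h2.2⟩
        rw [pvLoopA, pvLoopB, dif_pos hj, dif_pos hj, if_neg hc, if_neg hc, h4', if_neg h4,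
          h3', if_neg h3, if_pos hs,
          pvTwo, if_neg (by omega), if_pos h2.2, if_pos hcond,
          pvBuildR_getD row c n n (le_refl n) (j+1) (by omega),
          pvBuildL_getD row c n j hj]
        simp only [Nat.sub_self, Nat.zero_add]
        simp only [hsum]
        exact ih _ _ (by omega)
      · have h2' : pvTwo row n c j = none := by
          rw [pvTwo]
          by_cases hle : j + 2 ≤ n
          · rw [if_neg (by omega), if_neg (fun h => h2 ⟨hle, h⟩)]
          · rw [if_pos (by omega)]
        rw [pvLoopA, pvLoopB, dif_pos hj, dif_pos hj, if_neg hc, if_neg hc, h4', if_neg h4,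
          h3', if_neg h3, if_pos hs, h2', if_neg (fun h => h2 ⟨h.2.1, h.2.2⟩)]
        exact ih _ _ (by omega)
    · rw [pvLoopA, pvLoopB, dif_pos hj, dif_pos hj, if_neg hc, if_neg hc, h4', if_neg h4,
        h3', if_neg h3, if_neg hs, if_neg (fun h => hs h.1)]
      exact ih _ _ (by omega)

-- ===== VERDICT (by name: the statement is the Claim_ definition above) =====
theorem calc_score_line_spec : Claim_equal_calc_score_line := by
  intro board checking _ _
  unfold Spec_calc_score_line calc_score_line calc_score_line_alt
  have hfun : (fun (score : Int) (row : List Int) => pvLoopA row board.length checking 0 score) =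
      (fun (total : Int) (row : List Int) =>
        pvLoopB row (pvBuildL row checking board.length)
          (pvBuildR row checking board.length board.length) board.length checking 0 total) := by
    funext s row
    exact pvLoop_eq row board.length checking board.length 0 s (by omega)
  rw [hfun]
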